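-- pv_equiv track=rewrite | github.com/pharouhk/sample-store-app | libraries/helpers.py | generate_month_order
-- ===== SOURCE A (Python) =====
-- def generate_month_order(start_year = '2014', end_year = '2017'):
--     month_order = []
--     month_list = ['Jan', 'Feb', 'Mar', 'Apr', 'May', 'Jun', 'Jul', 'Aug', 'Sep', 'Oct', 'Nov', 'Dec']
--     year_list = []
--     year_length = (int(end_year) - int(start_year))+1
--     for ind in range(0, year_length):
--         yr = str(int(start_year) + ind)
--         for month in month_list:
--             month_order.append( month + '-' + yr)
--
--     return month_order
-- ===== SOURCE B (Python) =====
-- def generate_month_order(start_year = '2014', end_year = '2017'):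
--     month_list = ['Jan', 'Feb', 'Mar', 'Apr', 'May', 'Jun', 'Jul', 'Aug', 'Sep', 'Oct', 'Nov', 'Dec']
--     def go(y, e):
--         if y > e:
--             return []
--         return [m + '-' + str(y) for m in month_list] + go(y + 1, e)
--     return go(int(start_year), int(end_year))
-- ===== Notes on version B (the rewrite author's own statement) =====
-- stated objective: alternative
-- what changed: Replaces the iterative nested append loops with a recursive decomposition: a helper recurses over the years, building each year's block with a map over the months and concatenating the tail blocks, instead of folding appends into one accumulator.
import Mathlib
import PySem

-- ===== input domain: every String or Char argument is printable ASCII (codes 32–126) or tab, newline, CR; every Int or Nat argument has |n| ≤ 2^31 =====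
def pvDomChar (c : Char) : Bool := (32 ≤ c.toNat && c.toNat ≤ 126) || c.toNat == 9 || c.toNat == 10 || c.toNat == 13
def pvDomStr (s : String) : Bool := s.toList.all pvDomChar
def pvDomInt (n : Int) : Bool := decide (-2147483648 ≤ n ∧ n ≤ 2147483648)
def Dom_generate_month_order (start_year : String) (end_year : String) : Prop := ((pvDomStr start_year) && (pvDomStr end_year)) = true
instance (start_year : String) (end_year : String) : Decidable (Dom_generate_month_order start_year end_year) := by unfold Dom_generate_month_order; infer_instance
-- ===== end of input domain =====

-- B replaces A's iterative nested accumulator loops with a recursion over the years,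
-- each year's block built by a map over the months (alternative decomposition).


-- ===== PORT A =====
-- nested loops: for each year index, append one entry per month
def generate_month_order (start_year : String) (end_year : String) : List String :=
  match PySem.Int.ofStr? start_year, PySem.Int.ofStr? end_year with
  | some s, some e =>
    let month_list : List String := ["Jan", "Feb", "Mar", "Apr", "May", "Jun", "Jul", "Aug", "Sep", "Oct", "Nov", "Dec"]
    let year_length := (e - s) + 1
    (PySem.List.pyRange 0 year_length 1).foldl (fun month_order ind =>
      let yr := PySem.Int.toStr (s + ind)
      month_list.foldl (fun acc month => acc ++ [month ++ "-" ++ yr]) month_order) []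
  | _, _ => []   -- Python raises ValueError here; excluded by Pre_

-- ===== PORT B =====
-- recursive helper over the years: one block per year, concatenated with the recursive tail
def gmoGo (month_list : List String) (y e : Int) : List String :=
  if y > e then []
  else month_list.map (fun m => m ++ "-" ++ PySem.Int.toStr y) ++ gmoGo month_list (y + 1) e
termination_by (e + 1 - y).toNat
decreasing_by omega

def generate_month_order_alt (start_year : String) (end_year : String) : List String :=
  let month_list : List String := ["Jan", "Feb", "Mar", "Apr", "May", "Jun", "Jul", "Aug", "Sep", "Oct", "Nov", "Dec"]
  match PySem.Int.ofStr? start_year with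
  | none => []   -- Python raises ValueError here; excluded by Pre_
  | some s =>
    match PySem.Int.ofStr? end_year with
    | none => []   -- Python raises ValueError here; excluded by Pre_
    | some e => gmoGo month_list s e

-- ===== PRECONDITION & SPEC =====
-- A raises ValueError when either argument is not an int-parseable string; exactly those inputs are excluded.
def Pre_generate_month_order (start_year : String) (end_year : String) : Prop :=
  (PySem.Int.ofStr? start_year).isSome ∧ (PySem.Int.ofStr? end_year).isSome
instance (start_year : String) (end_year : String) : Decidable (Pre_generate_month_order start_year end_year) := by unfold Pre_generate_month_order; infer_instance
def pvWitness_generate_month_order : String × String := ("2014", "2017")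
def Spec_generate_month_order (start_year : String) (end_year : String) (out : List String) : Prop := out = generate_month_order_alt start_year end_year
instance (start_year : String) (end_year : String) (out : List String) : Decidable (Spec_generate_month_order start_year end_year out) := by unfold Spec_generate_month_order; infer_instance

-- ===== CLAIM =====
def Claim_equal_generate_month_order : Prop := ∀ (start_year : String) (end_year : String), Dom_generate_month_order start_year end_year → Pre_generate_month_order start_year end_year → Spec_generate_month_order start_year end_year (generate_month_order start_year end_year)

-- ===== LEMMAS AND PROOFS =====

-- the recursion over years equals A's flatMap of year blocks over the integer range
theorem gmoGo_main (months : List String) (s e : Int) (a : Int) :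
    (PySem.List.pyRange a (e - s + 1) 1).flatMap
        (fun x => months.map (fun m => m ++ "-" ++ PySem.Int.toStr (s + x)))
      = gmoGo months (s + a) e := by
  generalize hK : (e - s + 1 - a).toNat = K
  induction K generalizing a with
  | zero =>
    rw [PySem.List.pyRange_one_eq_nil (by omega), gmoGo, if_pos (by omega)]
    simp
  | succ K ih =>
    have ha : a < e - s + 1 := by omega
    rw [PySem.List.pyRange_one_cons ha, List.flatMap_cons, gmoGo, if_neg (by omega)]
    congr 1
    rw [ih (a + 1) (by omega), show s + (a + 1) = s + a + 1 by ring]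

-- ===== VERDICT =====
theorem generate_month_order_spec : Claim_equal_generate_month_order := by
  intro sy ey _ hpre
  unfold Spec_generate_month_order generate_month_order generate_month_order_alt
  obtain ⟨hs0, he0⟩ := hpre
  obtain ⟨s, hs⟩ := Option.isSome_iff_exists.mp hs0
  obtain ⟨e, he⟩ := Option.isSome_iff_exists.mp he0
  rw [hs, he]
  simp only [PySem.List.foldl_append_singleton_eq_map, PySem.List.foldl_append_eq_flatMap,
    List.nil_append]
  rw [gmoGo_main _ s e 0, show s + 0 = s by ring]
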